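-- pv_equiv track=rewrite | github.com/MishaKoval/ISPLabs | lab2/Serializers/serializer.py | load_string
-- ===== SOURCE A (Python) =====
-- def load_string(data, index):
--     first = index
--     opened = False
--     try:
--         while data[index] != '"' or opened:
--             if data[index] == "\\":
--                 opened = not opened
--             else:
--                 opened = False
--             index += 1
--     except IndexError:
--         raise StopIteration(index)
--     return data[first:index], index + 1
-- ===== SOURCE B (Python) =====
-- def load_string(data, index):
--     pos = index
--     while True:
--         q = data.find('"', pos)
--         if q == -1:
--             raise StopIteration(len(data))
--         k = q
--         while k > index and data[k - 1] == '\\':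
--             k -= 1
--         if (q - k) % 2 == 0:
--             return data[index:q], q + 1
--         pos = q + 1
-- ===== Notes on version B (the rewrite author's own statement) =====
-- stated objective: alternative
-- what changed: Replaces A's per-character escape-state machine with a loop that jumps between quote positions via str.find and validates each candidate by counting the consecutive backslashes immediately before it (bounded at the token start).
-- outside the precondition, e.g. on load_string('a"b', -1): A returns ('', 2), B raises StopIteration; on load_string('"', -1): A returns ('', 0), B returns ('', 1)
import Mathlib
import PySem

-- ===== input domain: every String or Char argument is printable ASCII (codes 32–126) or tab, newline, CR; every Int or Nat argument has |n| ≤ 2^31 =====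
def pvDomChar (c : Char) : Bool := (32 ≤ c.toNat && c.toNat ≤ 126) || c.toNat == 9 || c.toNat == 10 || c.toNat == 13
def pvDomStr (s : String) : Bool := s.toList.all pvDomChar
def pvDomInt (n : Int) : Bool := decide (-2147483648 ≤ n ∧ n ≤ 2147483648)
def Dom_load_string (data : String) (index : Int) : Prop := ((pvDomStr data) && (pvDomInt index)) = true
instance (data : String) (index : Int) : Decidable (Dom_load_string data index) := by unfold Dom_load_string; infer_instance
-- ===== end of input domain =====

-- B replaces A's per-character escape-state machine by jumping between quote positions with
-- str.find and checking the parity of the backslash run before each candidate quote.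
-- Equality of RETURN VALUES is claimed on Pre_ (A raises StopIteration elsewhere, and
-- negative indices are excluded — see the comment at Pre_load_string).

-- ===== PORT A =====
-- while data[index] != '"' or opened: toggle/reset `opened`, index += 1; IndexError → StopIteration.
-- Fuel only makes the recursion total; within Pre_ it is never exhausted (the scan is ≤ len steps).
def loadAGo (cs : List Char) (first : Int) (opened : Bool) (index : Int) : Nat → String × Int
  | 0 => ("", index)          -- fuel exhausted: unreachable under Pre_
  | fuel + 1 =>
    match PySem.List.pyGet? cs index with
    | none => ("", index)     -- data[index] raises IndexError → StopIteration(index): outside Pre_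
    | some c =>
      if c ≠ '"' ∨ opened = true then
        loadAGo cs first (if c = '\\' then !opened else false) (index + 1) fuel
      else
        (String.ofList (PySem.List.slice cs (some first) (some index)), index + 1)

def load_string (data : String) (index : Int) : String × Int :=
  loadAGo data.toList index false index (2 * data.toList.length + 2)

-- ===== PORT B =====
-- inner loop of B: `k = q; while k > index and data[k-1] == '\\': k -= 1`; returns the final k.
def loadBWalk (cs : List Char) (index : Int) (k : Int) : Nat → Int
  | 0 => k
  | fuel + 1 =>
    if index < k ∧ PySem.List.pyGet? cs (k - 1) = some '\\' then
      loadBWalk cs index (k - 1) fuel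
    else k

-- outer loop of B: q = data.find('"', pos); validate by backslash-run parity, else pos = q+1.
def loadBGo (cs : List Char) (index : Int) (pos : Int) : Nat → String × Int
  | 0 => ("", -1)             -- fuel exhausted: unreachable under Pre_
  | fuel + 1 =>
    let q := PySem.Chars.findFrom cs ['"'] pos none
    if q = -1 then ("", PySem.List.len cs)   -- raise StopIteration(len(data)): outside Pre_
    else
      let k := loadBWalk cs index q q.toNat
      if PySem.Int.mod (q - k) 2 = 0 then
        (String.ofList (PySem.List.slice cs (some index) (some q)), q + 1)
      else loadBGo cs index (q + 1) fuel

def load_string_alt (data : String) (index : Int) : String × Int :=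
  loadBGo data.toList index index (data.toList.length + 2)

-- ===== PRECONDITION & SPEC =====

-- runp cs i0 j = length of the run of consecutive backslashes immediately before position j,
-- not reaching back before i0 (the character after which escaping is live in A's scan).
def runp (cs : List Char) (i0 : Nat) : Nat → Nat
  | 0 => 0
  | j + 1 => if i0 < j + 1 ∧ cs.getD j ' ' = '\\' then runp cs i0 j + 1 else 0

-- position j closes the string started at i0: a quote preceded by an even backslash run.
def goodB (cs : List Char) (i0 j : Nat) : Bool :=
  decide (i0 ≤ j ∧ j < cs.length ∧ cs.getD j ' ' = '"' ∧ runp cs i0 j % 2 = 0)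

-- Pre_ excludes (a) inputs where A raises StopIteration (no unescaped closing quote at or
-- after index), and (b) negative indices, where A's scan wraps around (reads the tail, then
-- restarts at position 0 carrying the escape state) — an accident of Python's negative
-- indexing on which B's find-based search raises StopIteration or returns another position.
def Pre_load_string (data : String) (index : Int) : Prop :=
  0 ≤ index ∧ ((List.range data.toList.length).any (goodB data.toList index.toNat)) = true

instance (data : String) (index : Int) : Decidable (Pre_load_string data index) := by
  unfold Pre_load_string; infer_instance

def pvWitness_load_string : String × Int := ("abc\"", 0)

def Spec_load_string (data : String) (index : Int) (out : String × Int) : Prop :=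
  out = load_string_alt data index
instance (data : String) (index : Int) (out : String × Int) : Decidable (Spec_load_string data index out) := by
  unfold Spec_load_string; infer_instance

-- ===== CLAIM (what is proved, stated in full; the proofs are below) =====
def Claim_equal_load_string : Prop := ∀ (data : String) (index : Int), Dom_load_string data index → Pre_load_string data index → Spec_load_string data index (load_string data index)

-- ===== LEMMAS AND PROOFS =====

theorem goodB_iff (cs : List Char) (i0 j : Nat) :
    goodB cs i0 j = true ↔ i0 ≤ j ∧ j < cs.length ∧ cs.getD j ' ' = '"' ∧ runp cs i0 j % 2 = 0 := by
  simp [goodB]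

theorem singleton_prefix_drop (cs : List Char) (j : Nat) (c : Char) :
    [c] <+: cs.drop j ↔ cs[j]? = some c := by
  rw [← List.head?_drop]
  cases h : cs.drop j with
  | nil => simp
  | cons a l =>
    simp only [List.head?_cons]
    constructor
    · rintro ⟨t, ht⟩
      cases ht; rfl
    · rintro h2
      cases h2
      exact ⟨l, rfl⟩

-- A's loop, under the invariants, returns the first good position J.
theorem lemA (cs : List Char) (i0 : Nat) (h : ∃ j, goodB cs i0 j = true) :
    ∀ (fuel i : Nat), i0 ≤ i →
      (∀ t, i0 ≤ t → t < i → goodB cs i0 t = false) →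
      cs.length - i < fuel →
      loadAGo cs (i0 : Int) (decide (runp cs i0 i % 2 = 1)) (i : Int) fuel =
        (String.ofList ((cs.drop i0).take (Nat.find h - i0)), ((Nat.find h : Int) + 1)) := by
  intro fuel
  induction fuel with
  | zero => intro i _ _ h3; omega
  | succ f ih =>
    intro i h1 h2 h3
    obtain ⟨hJ1, hJ2, hJ3, hJ4⟩ := (goodB_iff cs i0 (Nat.find h)).mp (Nat.find_spec h)
    have hiJ : i ≤ Nat.find h := by
      by_contra hc
      push_neg at hc
      have := h2 (Nat.find h) hJ1 hc
      rw [Nat.find_spec h] at this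
      exact absurd this (by simp)
    have hin : i < cs.length := by omega
    have hgi : cs[i]? = some cs[i] := List.getElem?_eq_getElem hin
    have hgetD : cs.getD i ' ' = cs[i] := by
      rw [List.getD_eq_getElem?_getD, hgi]; rfl
    unfold loadAGo
    rw [PySem.List.pyGet?_natCast, hgi]
    show (if cs[i] ≠ '"' ∨ decide (runp cs i0 i % 2 = 1) = true then
        loadAGo cs (↑i0) (if cs[i] = '\\' then !decide (runp cs i0 i % 2 = 1) else false) (↑i + 1) f
      else (String.ofList (PySem.List.slice cs (some ↑i0) (some ↑i)), ↑i + 1)) = _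
    by_cases hcq : (cs[i] ≠ '"' ∨ decide (runp cs i0 i % 2 = 1) = true)
    · rw [if_pos hcq]
      have hbad : goodB cs i0 i = false := by
        rw [goodB, decide_eq_false_iff_not]
        rcases hcq with hcq | hcq
        · rintro ⟨-, -, hx, -⟩
          exact hcq (hgetD ▸ hx)
        · have : runp cs i0 i % 2 = 1 := of_decide_eq_true hcq
          rintro ⟨-, -, -, he⟩
          omega
      have hnew : (if cs[i] = '\\' then !(decide (runp cs i0 i % 2 = 1)) else false)
          = decide (runp cs i0 (i + 1) % 2 = 1) := by
        by_cases hbs : cs[i] = '\\'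
        · have hcond : i0 < i + 1 ∧ cs.getD i ' ' = '\\' := ⟨by omega, by rw [hgetD, hbs]⟩
          have hr : runp cs i0 (i + 1) = runp cs i0 i + 1 := by
            simp only [runp, if_pos hcond]
          rw [if_pos hbs, hr]
          rcases Nat.mod_two_eq_zero_or_one (runp cs i0 i) with h0 | h0 <;>
            simp [h0, Nat.add_mod]
        · have hr : runp cs i0 (i + 1) = 0 := by
            simp only [runp]
            rw [if_neg (by rw [hgetD]; tauto)]
          rw [if_neg hbs, hr]
          simp
      have hstep := ih (i + 1) (by omega)
        (fun t ht1 ht2 => by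
          rcases Nat.lt_succ_iff_lt_or_eq.mp ht2 with hlt | heq
          · exact h2 t ht1 hlt
          · subst heq; exact hbad)
        (by omega)
      rw [hnew]
      have hcast : (i : Int) + 1 = ((i + 1 : Nat) : Int) := by push_cast; ring
      rw [hcast]
      exact hstep
    · rw [if_neg hcq]
      push_neg at hcq
      obtain ⟨hq, hop⟩ := hcq
      have heven : runp cs i0 i % 2 = 0 := by
        rcases Nat.mod_two_eq_zero_or_one (runp cs i0 i) with h0 | h0
        · exact h0
        · exact absurd (decide_eq_true h0) (by simpa using hop)
      have hgood : goodB cs i0 i = true :=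
        (goodB_iff cs i0 i).mpr ⟨h1, hin, by rw [hgetD, hq], heven⟩
      have hJi : Nat.find h ≤ i := Nat.find_min' h hgood
      have hie : i = Nat.find h := le_antisymm hiJ hJi
      rw [PySem.List.slice_natCast, ← hie]

theorem runp_self (cs : List Char) (i0 : Nat) : runp cs i0 i0 = 0 := by
  cases i0 <;> simp [runp]

theorem modcast (r : Nat) : PySem.Int.mod ((r : Nat) : Int) 2 = ((r % 2 : Nat) : Int) := by
  simp [PySem.Int.mod, Int.fmod_eq_emod]

-- B's inner loop computes q - runp.
theorem lemWalk (cs : List Char) (i0 : Nat) :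
    ∀ (fuel q : Nat), i0 ≤ q → q ≤ cs.length → q - i0 ≤ fuel →
      loadBWalk cs (i0 : Int) (q : Int) fuel = (q : Int) - (runp cs i0 q : Int) := by
  intro fuel
  induction fuel with
  | zero =>
    intro q h1 h2 h3
    have : q = i0 := by omega
    subst this
    simp [loadBWalk, runp_self]
  | succ f ih =>
    intro q h1 h2 h3
    rcases Nat.eq_or_lt_of_le h1 with heq | hlt
    · subst heq
      simp [loadBWalk, runp_self]
    · obtain ⟨j, rfl⟩ : ∃ j, q = j + 1 := ⟨q - 1, by omega⟩
      have hj : j < cs.length := by omega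
      have hcast : ((j + 1 : Nat) : Int) - 1 = ((j : Nat) : Int) := by push_cast; ring
      have hget : PySem.List.pyGet? cs (((j + 1 : Nat) : Int) - 1) = cs[j]? := by
        rw [hcast, PySem.List.pyGet?_natCast]
      have hgj : cs[j]? = some cs[j] := List.getElem?_eq_getElem hj
      have hgetD : cs.getD j ' ' = cs[j] := by
        rw [List.getD_eq_getElem?_getD, hgj]; rfl
      unfold loadBWalk
      by_cases hb : cs[j] = '\\'
      · rw [if_pos ⟨by exact_mod_cast hlt, by rw [hget, hgj, hb]⟩, hcast,
          ih j (by omega) (by omega) (by omega)]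
        have hcond : i0 < j + 1 ∧ cs.getD j ' ' = '\\' := ⟨hlt, by rw [hgetD, hb]⟩
        have hr : runp cs i0 (j + 1) = runp cs i0 j + 1 := by
          simp only [runp, if_pos hcond]
        rw [hr]; push_cast; ring
      · rw [if_neg (by rw [hget, hgj]; simp [hb])]
        have hr : runp cs i0 (j + 1) = 0 := by
          simp only [runp]
          rw [if_neg (by rw [hgetD]; tauto)]
        rw [hr]; simp

-- B's outer loop, under the invariants, returns the first good position J.
theorem lemB (cs : List Char) (i0 : Nat) (h : ∃ j, goodB cs i0 j = true) :
    ∀ (fuel pos : Nat), i0 ≤ pos → pos ≤ Nat.find h →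
      cs.length - pos < fuel →
      loadBGo cs (i0 : Int) (pos : Int) fuel =
        (String.ofList ((cs.drop i0).take (Nat.find h - i0)), ((Nat.find h : Int) + 1)) := by
  intro fuel
  induction fuel with
  | zero =>
    intro pos _ h2 h3
    obtain ⟨_, hJ2, _, _⟩ := (goodB_iff cs i0 (Nat.find h)).mp (Nat.find_spec h)
    omega
  | succ f ih =>
    intro pos h1 h2 h3
    obtain ⟨hJ1, hJ2, hJ3, hJ4⟩ := (goodB_iff cs i0 (Nat.find h)).mp (Nat.find_spec h)
    have hposn : pos ≤ cs.length := by omega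
    have hJelem : cs[Nat.find h]? = some '"' := by
      rw [List.getElem?_eq_getElem hJ2]
      rw [List.getD_eq_getElem?_getD, List.getElem?_eq_getElem hJ2] at hJ3
      exact congrArg some hJ3
    have hpre : ['"'] <+: cs.drop (Nat.find h) := (singleton_prefix_drop cs _ _).mpr hJelem
    have hne : PySem.Chars.findFrom cs ['"'] (pos : Int) none ≠ -1 := by
      rw [Ne, PySem.Chars.findFrom_natCast_eq_neg_one_iff cs ['"'] pos hposn]
      have hsuf : cs.drop (Nat.find h) <:+ cs.drop pos := by
        have hd : cs.drop (Nat.find h) = (cs.drop pos).drop (Nat.find h - pos) := by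
          rw [List.drop_drop]
          congr 1
          omega
        rw [hd]
        exact List.drop_suffix _ _
      simpa using hpre.isInfix.trans hsuf.isInfix
    obtain ⟨hq1, hq2, hq3⟩ := PySem.Chars.findFrom_natCast_spec cs ['"'] pos hposn hne
    unfold loadBGo
    simp only []
    rw [if_neg hne]
    set q := PySem.Chars.findFrom cs ['"'] (pos : Int) none with hqdef
    set qn := q.toNat with hqndef
    have hq0 : (0 : Int) ≤ q := le_trans (by exact_mod_cast Nat.zero_le pos) hq1
    have hqe : q = (qn : Int) := (Int.toNat_of_nonneg hq0).symm
    have hposq : pos ≤ qn := by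
      have := hq1
      rw [hqe] at this
      exact_mod_cast this
    have hgq : cs[qn]? = some '"' := (singleton_prefix_drop cs qn '"').mp hq2
    have hqlen : qn < cs.length := by
      by_contra hc
      rw [List.getElem?_eq_none (by omega)] at hgq
      cases hgq
    have hgetDq : cs.getD qn ' ' = '"' := by
      rw [List.getD_eq_getElem?_getD, hgq]
      rfl
    have hqJ : qn ≤ Nat.find h := by
      by_contra hc
      exact hq3 (Nat.find h) h2 (by omega) hpre
    have hwalk : loadBWalk cs (i0 : Int) q q.toNat = (qn : Int) - (runp cs i0 qn : Int) := by
      rw [hqe]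
      rw [Int.toNat_natCast]
      exact lemWalk cs i0 qn qn (by omega) (by omega) (by omega)
    rw [hwalk]
    have hdiff : q - ((qn : Int) - (runp cs i0 qn : Int)) = ((runp cs i0 qn : Nat) : Int) := by
      rw [hqe]; ring
    rw [hdiff, modcast]
    by_cases hpar : runp cs i0 qn % 2 = 0
    · rw [if_pos (by rw [hpar]; rfl)]
      have hgood : goodB cs i0 qn = true :=
        (goodB_iff cs i0 qn).mpr ⟨by omega, hqlen, hgetDq, hpar⟩
      have hJq : Nat.find h ≤ qn := Nat.find_min' h hgood
      have hqJe : qn = Nat.find h := by omega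
      rw [hqe, PySem.List.slice_natCast, hqJe]
    · rw [if_neg (by
        intro hc
        apply hpar
        have : ((runp cs i0 qn % 2 : Nat) : Int) = 0 := hc
        exact_mod_cast this)]
      have hqJne : qn ≠ Nat.find h := by
        intro hc
        rw [hc] at hpar
        exact hpar hJ4
      have hstep := ih (qn + 1) (by omega) (by omega) (by omega)
      rw [hqe]
      have hcast : ((qn : Nat) : Int) + 1 = ((qn + 1 : Nat) : Int) := by push_cast; ring
      rw [hcast]
      exact hstep

-- ===== VERDICT (by name: the statement is the Claim_ definition above) =====
theorem load_string_spec : Claim_equal_load_string := by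
  intro data index _hdom hpre
  obtain ⟨hnn, hany⟩ := hpre
  unfold Spec_load_string
  have hi : index = ((index.toNat : Nat) : Int) := (Int.toNat_of_nonneg hnn).symm
  set cs := data.toList with hcs
  set i0 := index.toNat with hi0
  have h : ∃ j, goodB cs i0 j = true := by
    rcases List.any_eq_true.mp hany with ⟨j, _, hj⟩
    exact ⟨j, hj⟩
  have hA : load_string data index =
      (String.ofList ((cs.drop i0).take (Nat.find h - i0)), ((Nat.find h : Int) + 1)) := by
    have := lemA cs i0 h (2 * cs.length + 2) i0 le_rfl
      (fun t h1 h2 => absurd h1 (by omega)) (by omega)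
    have hb : decide (runp cs i0 i0 % 2 = 1) = false := by
      cases i0 <;> simp [runp]
    rw [hb] at this
    unfold load_string
    rw [← hcs, hi]
    exact this
  have hB : load_string_alt data index =
      (String.ofList ((cs.drop i0).take (Nat.find h - i0)), ((Nat.find h : Int) + 1)) := by
    have hle : i0 ≤ Nat.find h := ((goodB_iff _ _ _).mp (Nat.find_spec h)).1
    have := lemB cs i0 h (cs.length + 2) i0 le_rfl hle (by omega)
    unfold load_string_alt
    rw [← hcs, hi]
    exact this
  rw [hA, hB]
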